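-- pv_equiv track=rewrite | github.com/douph810975/NeuroMesh-test | first.py | count_subsequences
-- ===== SOURCE A (Python) =====
-- def count_subsequences(source, target):
--     # 检查target中的字符是不是都在source中
--     unique_chars_source = set(source)
--     for char in target:
--         if char not in unique_chars_source:
--             return -1
--
--     subsequences_count = 0
--     i = 0  # target的index
--
--     while i < len(target):
--         subsequences_count += 1
--         j = 0  # source index
--         while i < len(target) and j < len(source):
--             if target[i] == source[j]:
--                 i += 1
--             j += 1
--
--     return subsequences_count
-- ===== SOURCE B (Python) =====
-- def count_subsequences(source, target):
--     # Precompute, for every character, the sorted list of its positions in source;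
--     # then walk target once, binary-searching the next occurrence (wrap = one more copy).
--     positions = {}
--     for idx, ch in enumerate(source):
--         positions.setdefault(ch, []).append(idx)
--     if any(ch not in positions for ch in target):
--         return -1
--     count = 0
--     j = len(source)  # next source index to try; forces a wrap (count += 1) on the first char
--     for ch in target:
--         ps = positions[ch]
--         lo, hi = 0, len(ps)  # binary search: first index with ps[index] >= j
--         while lo < hi:
--             mid = (lo + hi) // 2
--             if ps[mid] < j:
--                 lo = mid + 1
--             else:
--                 hi = mid
--         if lo == len(ps):
--             count += 1
--             j = ps[0] + 1
--         else:
--             j = ps[lo] + 1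
--     return count
-- ===== Notes on version B (the rewrite author's own statement) =====
-- stated objective: alternative
-- what changed: A repeatedly restarts a nested scan of source (one full pass per copy, advancing the target index greedily); B precomputes a dict of per-character position lists once and walks target in a single pass, binary-searching each character's next occurrence and counting wrap-arounds.
import Mathlib
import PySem

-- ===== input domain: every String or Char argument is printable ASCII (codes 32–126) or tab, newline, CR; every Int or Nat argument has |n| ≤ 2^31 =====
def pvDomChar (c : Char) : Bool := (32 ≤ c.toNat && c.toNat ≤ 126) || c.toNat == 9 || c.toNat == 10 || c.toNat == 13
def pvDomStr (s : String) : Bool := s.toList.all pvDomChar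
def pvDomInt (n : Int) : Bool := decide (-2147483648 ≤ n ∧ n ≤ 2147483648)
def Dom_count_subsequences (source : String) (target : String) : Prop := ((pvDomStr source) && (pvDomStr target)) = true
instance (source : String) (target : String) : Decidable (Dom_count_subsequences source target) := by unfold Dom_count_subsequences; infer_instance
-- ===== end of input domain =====

-- B replaces A's restart-the-scan passes by per-character position lists with a binary
-- search for the next occurrence; equivalence of the two traversals is proved below.

-- ===== PORT A =====
-- inner 'while i < len(target) and j < len(source)' loop; returns the final i
def pvInnerA (s t : List Char) (i j : Nat) : Nat :=
  if _h : i < t.length ∧ j < s.length then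
    if t.getD i ' ' == s.getD j ' ' then pvInnerA s t (i + 1) (j + 1)
    else pvInnerA s t i (j + 1)
  else i
termination_by s.length - j
decreasing_by all_goals omega

-- outer 'while i < len(target)' loop; fuel = len(target) suffices because, with every
-- target character present in source, each pass advances i by at least one
def pvOuterA (s t : List Char) : Nat → Nat → Int → Int
  | 0, _, cnt => cnt
  | fuel + 1, i, cnt =>
    if i < t.length then pvOuterA s t fuel (pvInnerA s t i 0) (cnt + 1) else cnt

def count_subsequences (source : String) (target : String) : Int :=
  let s := source.toList
  let t := target.toList
  let uniq := PySem.Set.ofList s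
  match t.find? (fun c => !(PySem.Set.contains uniq c)) with
  | some _ => -1
  | none => pvOuterA s t t.length 0 0

-- ===== PORT B =====
-- 'positions.setdefault(ch, []).append(idx)' over enumerate(source)  (zipIdx = (char, index) pairs)
def pvBuildPos (s : List Char) : PySem.Dict Char (List Nat) :=
  s.zipIdx.foldl (fun d p => d.insert p.1 (d.getD p.1 [] ++ [p.2])) PySem.Dict.empty

-- hand-written binary search of Source B: first index in [lo, hi) with ps[index] >= j (else hi)
def pvBisect (ps : List Nat) (j : Nat) (lo hi : Nat) : Nat :=
  if _h : lo < hi then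
    let mid := (lo + hi) / 2
    if ps.getD mid 0 < j then pvBisect ps j (mid + 1) hi else pvBisect ps j lo mid
  else lo
termination_by hi - lo
decreasing_by all_goals omega

-- the body of Source B's 'for ch in target' loop; state = (j, count)
def pvStepB (pos : PySem.Dict Char (List Nat)) (st : Nat × Int) (c : Char) : Nat × Int :=
  let ps := pos.getD c []
  let lo := pvBisect ps st.1 0 ps.length
  if lo = ps.length then (ps.getD 0 0 + 1, st.2 + 1) else (ps.getD lo 0 + 1, st.2)

def count_subsequences_alt (source : String) (target : String) : Int :=
  let s := source.toList
  let t := target.toList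
  let pos := pvBuildPos s
  if t.any (fun c => !(pos.contains c)) then -1
  else (t.foldl (pvStepB pos) (s.length, 0)).2

-- ===== PRECONDITION & SPEC =====
def Spec_count_subsequences (source : String) (target : String) (out : Int) : Prop := out = count_subsequences_alt source target
instance (source : String) (target : String) (out : Int) : Decidable (Spec_count_subsequences source target out) := by unfold Spec_count_subsequences; infer_instance

-- ===== CLAIM (what is proved, stated in full; the proofs are below) =====
def Claim_equal_count_subsequences : Prop := ∀ (source : String) (target : String), Dom_count_subsequences source target → Spec_count_subsequences source target (count_subsequences source target)


-- ===== LEMMAS AND PROOFS =====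

-- least k ≥ j with s[k] = c (the reference 'next occurrence' function)
def pvNext (s : List Char) (c : Char) (j : Nat) : Option Nat :=
  if _h : j < s.length then
    if s.getD j ' ' == c then some j else pvNext s c (j + 1)
  else none
termination_by s.length - j
decreasing_by omega

-- reference run: one step per target character, wrapping (and counting) when no
-- occurrence at index ≥ j remains
def pvRef (s : List Char) : List Char → Nat → Int → Int
  | [], _, cnt => cnt
  | c :: cs, j, cnt =>
    match pvNext s c j with
    | some k => pvRef s cs (k + 1) cnt
    | none =>
      match pvNext s c 0 with
      | some k0 => pvRef s cs (k0 + 1) (cnt + 1)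
      | none => -1

-- the per-character position list Source B builds and searches
def pvPos (s : List Char) (c : Char) : List Nat :=
  (s.zipIdx.filter (fun p => p.1 == c)).map (·.2)

-- ---------- unfolding helpers ----------

theorem pvNext_none_of_le (s : List Char) (c : Char) {j : Nat} (h : s.length ≤ j) :
    pvNext s c j = none := by
  unfold pvNext; simp [Nat.not_lt_of_le h]

theorem pvNext_hit (s : List Char) (c : Char) {j : Nat} (hj : j < s.length)
    (he : s.getD j ' ' = c) : pvNext s c j = some j := by
  unfold pvNext; rw [dif_pos hj, if_pos (beq_iff_eq.mpr he)]

theorem pvNext_miss (s : List Char) (c : Char) {j : Nat} (hj : j < s.length)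
    (he : s.getD j ' ' ≠ c) : pvNext s c j = pvNext s c (j + 1) := by
  conv_lhs => unfold pvNext
  rw [dif_pos hj, if_neg (fun hb => he (beq_iff_eq.mp hb))]

theorem pvRef_cons_some (s cs : List Char) (c : Char) (j : Nat) (cnt : Int) {k : Nat}
    (h : pvNext s c j = some k) : pvRef s (c :: cs) j cnt = pvRef s cs (k + 1) cnt := by
  conv_lhs => unfold pvRef
  rw [h]

theorem pvRef_cons_none (s cs : List Char) (c : Char) (j : Nat) (cnt : Int) {k0 : Nat}
    (h : pvNext s c j = none) (h0 : pvNext s c 0 = some k0) :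
    pvRef s (c :: cs) j cnt = pvRef s cs (k0 + 1) (cnt + 1) := by
  conv_lhs => unfold pvRef
  rw [h, h0]

theorem pvRef_cons_shift (s cs : List Char) (c : Char) (j : Nat) (cnt : Int)
    (h : pvNext s c j = none) :
    pvRef s (c :: cs) j cnt = pvRef s (c :: cs) s.length cnt := by
  conv_lhs => unfold pvRef
  conv_rhs => unfold pvRef
  rw [h, pvNext_none_of_le s c (le_refl _)]

theorem pvInnerA_stop (s t : List Char) {i j : Nat} (h : ¬(i < t.length ∧ j < s.length)) :
    pvInnerA s t i j = i := by
  conv_lhs => unfold pvInnerA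
  rw [dif_neg h]

theorem pvInnerA_hit (s t : List Char) {i j : Nat} (hi : i < t.length) (hj : j < s.length)
    (he : t.getD i ' ' = s.getD j ' ') : pvInnerA s t i j = pvInnerA s t (i + 1) (j + 1) := by
  conv_lhs => unfold pvInnerA
  rw [dif_pos ⟨hi, hj⟩, if_pos (beq_iff_eq.mpr he)]

theorem pvInnerA_miss (s t : List Char) {i j : Nat} (hi : i < t.length) (hj : j < s.length)
    (he : t.getD i ' ' ≠ s.getD j ' ') : pvInnerA s t i j = pvInnerA s t i (j + 1) := by
  conv_lhs => unfold pvInnerA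
  rw [dif_pos ⟨hi, hj⟩, if_neg (fun hb => he (beq_iff_eq.mp hb))]

theorem pvOuterA_succ (s t : List Char) (fuel i : Nat) (cnt : Int) :
    pvOuterA s t (fuel + 1) i cnt =
      if i < t.length then pvOuterA s t fuel (pvInnerA s t i 0) (cnt + 1) else cnt := rfl

-- ---------- facts about pvNext ----------

theorem pvNext_some (s : List Char) (c : Char) :
    ∀ j k, pvNext s c j = some k →
      j ≤ k ∧ k < s.length ∧ s.getD k ' ' = c ∧ ∀ m, j ≤ m → m < k → s.getD m ' ' ≠ c := by
  intro j
  induction hn : s.length - j using Nat.strong_induction_on generalizing j with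
  | _ n ih =>
    intro k hk
    unfold pvNext at hk
    split at hk
    · rename_i hj
      split at hk
      · rename_i he
        cases hk
        exact ⟨le_refl _, hj, by simpa using he, fun m h1 h2 => absurd (lt_of_le_of_lt h1 h2) (lt_irrefl _)⟩
      · rename_i he
        have := ih (s.length - (j + 1)) (by omega) (j + 1) rfl k hk
        refine ⟨by omega, this.2.1, this.2.2.1, ?_⟩
        intro m h1 h2
        rcases Nat.eq_or_lt_of_le h1 with h | h
        · subst h; simpa using he
        · exact this.2.2.2 m h h2
    · exact absurd hk (by simp)

theorem pvNext_none (s : List Char) (c : Char) :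
    ∀ j, pvNext s c j = none → ∀ m, j ≤ m → m < s.length → s.getD m ' ' ≠ c := by
  intro j
  induction hn : s.length - j using Nat.strong_induction_on generalizing j with
  | _ n ih =>
    intro hk m h1 h2
    unfold pvNext at hk
    split at hk
    · rename_i hj
      split at hk
      · exact absurd hk (by simp)
      · rename_i he
        rcases Nat.eq_or_lt_of_le h1 with h | h
        · subst h; simpa using he
        · exact ih (s.length - (j + 1)) (by omega) (j + 1) rfl hk m h h2
    · omega

theorem pvNext_min (s : List Char) (c : Char) :
    ∀ j v, j ≤ v → v < s.length → s.getD v ' ' = c →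
      (∀ m, j ≤ m → m < v → s.getD m ' ' ≠ c) → pvNext s c j = some v := by
  intro j
  induction hn : s.length - j using Nat.strong_induction_on generalizing j with
  | _ n ih =>
    intro v h1 h2 h3 h4
    rcases Nat.eq_or_lt_of_le h1 with h | h
    · subst h; exact pvNext_hit s c h2 h3
    · have hj : j < s.length := lt_trans h h2
      rw [pvNext_miss s c hj (h4 j (le_refl _) h)]
      exact ih (s.length - (j + 1)) (by omega) (j + 1) rfl v h h2 h3
        (fun m hm1 hm2 => h4 m (by omega) hm2)

theorem pvNext_zero_isSome (s : List Char) (c : Char) (h : c ∈ s) :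
    ∃ k, pvNext s c 0 = some k := by
  cases hk : pvNext s c 0 with
  | some k => exact ⟨k, rfl⟩
  | none =>
    rcases List.mem_iff_getElem.mp h with ⟨i, hi, he⟩
    exact absurd (List.getD_eq_getElem s ' ' hi ▸ he)
      (pvNext_none s c 0 hk i (Nat.zero_le _) hi)

-- ---------- A side: the nested scan equals the pvNext-driven recursion ----------

theorem pvInnerA_ge (s t : List Char) :
    ∀ j i, i ≤ pvInnerA s t i j := by
  intro j
  induction hn : s.length - j using Nat.strong_induction_on generalizing j with
  | _ n ih =>
    intro i
    unfold pvInnerA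
    split
    · split
      · exact le_trans (by omega) (ih (s.length - (j + 1)) (by omega) (j + 1) rfl (i + 1))
      · exact ih (s.length - (j + 1)) (by omega) (j + 1) rfl i
    · exact le_refl _

theorem pvInnerA_eq (s t : List Char) :
    ∀ j i, pvInnerA s t i j =
      if i < t.length then
        match pvNext s (t.getD i ' ') j with
        | some k => pvInnerA s t (i + 1) (k + 1)
        | none => i
      else i := by
  intro j
  induction hn : s.length - j using Nat.strong_induction_on generalizing j with
  | _ n ih =>
    intro i
    by_cases hi : i < t.length
    · rw [if_pos hi]
      by_cases hj : j < s.length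
      · by_cases he : t.getD i ' ' = s.getD j ' '
        · rw [pvNext_hit s _ hj he.symm]
          exact pvInnerA_hit s t hi hj he
        · rw [pvInnerA_miss s t hi hj he,
            ih (s.length - (j + 1)) (by omega) (j + 1) rfl i, if_pos hi,
            ← pvNext_miss s _ hj (fun h => he h.symm)]
      · rw [pvNext_none_of_le s _ (by omega)]
        exact pvInnerA_stop s t (fun h => hj h.2)
    · rw [if_neg hi]
      exact pvInnerA_stop s t (fun h => hi h.1)

theorem pvRef_drop_inner (s t : List Char) :
    ∀ n i j cnt, t.length - i ≤ n →
      pvRef s (t.drop i) j cnt = pvRef s (t.drop (pvInnerA s t i j)) s.length cnt := by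
  intro n
  induction n with
  | zero =>
    intro i j cnt h
    have h7 : pvInnerA s t i j = i := by
      rw [pvInnerA_eq]; rw [if_neg (by omega)]
    rw [h7, List.drop_eq_nil_of_le (by omega)]
    rfl
  | succ n ih =>
    intro i j cnt h
    by_cases hi : i < t.length
    · have hgd : t.getD i ' ' = t[i] := List.getD_eq_getElem t ' ' hi
      cases hk : pvNext s (t[i]) j with
      | some k =>
        have h7 : pvInnerA s t i j = pvInnerA s t (i + 1) (k + 1) := by
          rw [pvInnerA_eq, if_pos hi, hgd, hk]
        rw [List.drop_eq_getElem_cons hi, pvRef_cons_some s _ _ _ _ hk, h7]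
        exact ih (i + 1) (k + 1) cnt (by omega)
      | none =>
        have h7 : pvInnerA s t i j = i := by
          rw [pvInnerA_eq, if_pos hi, hgd, hk]
        rw [h7, List.drop_eq_getElem_cons hi, pvRef_cons_shift s _ _ _ _ hk]
    · have h7 : pvInnerA s t i j = i := by
        rw [pvInnerA_eq, if_neg hi]
      rw [h7, List.drop_eq_nil_of_le (by omega)]
      rfl

theorem pvOuterA_eq_ref (s t : List Char) (hall : ∀ c ∈ t, c ∈ s) :
    ∀ fuel i cnt, t.length - i ≤ fuel →
      pvOuterA s t fuel i cnt = pvRef s (t.drop i) s.length cnt := by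
  intro fuel
  induction fuel with
  | zero =>
    intro i cnt h
    rw [List.drop_eq_nil_of_le (by omega)]
    rfl
  | succ fuel ih =>
    intro i cnt h
    by_cases hi : i < t.length
    · have hgd : t.getD i ' ' = t[i] := List.getD_eq_getElem t ' ' hi
      rcases pvNext_zero_isSome s (t[i]) (hall _ (List.getElem_mem hi)) with ⟨k0, hk0⟩
      have h7 : pvInnerA s t i 0 = pvInnerA s t (i + 1) (k0 + 1) := by
        rw [pvInnerA_eq, if_pos hi, hgd, hk0]
      have hge : i + 1 ≤ pvInnerA s t (i + 1) (k0 + 1) := pvInnerA_ge s t (k0 + 1) (i + 1)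
      rw [pvOuterA_succ, if_pos hi,
        ih (pvInnerA s t i 0) (cnt + 1) (by rw [h7]; omega),
        List.drop_eq_getElem_cons hi,
        pvRef_cons_none s _ _ _ _ (pvNext_none_of_le s (t[i]) (le_refl _)) hk0,
        pvRef_drop_inner s t t.length (i + 1) (k0 + 1) (cnt + 1) (by omega), ← h7]
    · rw [pvOuterA_succ, if_neg hi, List.drop_eq_nil_of_le (by omega)]
      rfl


-- ---------- B side: the position lists, the binary search, and the fold ----------

theorem pvBuild_foldl_getD (l : List (Char × Nat)) :
    ∀ (d : PySem.Dict Char (List Nat)) (c : Char),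
      (l.foldl (fun d p => d.insert p.1 (d.getD p.1 [] ++ [p.2])) d).getD c []
        = d.getD c [] ++ (l.filter (fun p => p.1 == c)).map (·.2) := by
  induction l with
  | nil => simp
  | cons p l ih =>
    intro d c
    simp only [List.foldl_cons, ih]
    by_cases hc : p.1 = c
    · subst hc
      rw [PySem.Dict.getD_insert_self]
      simp
    · rw [PySem.Dict.getD_insert_of_ne _ _ _ (fun h => hc h.symm)]
      simp [hc]

theorem pvPos_getD (s : List Char) (c : Char) : (pvBuildPos s).getD c [] = pvPos s c := by
  unfold pvBuildPos pvPos
  rw [pvBuild_foldl_getD]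
  simp

theorem mem_pvPos (s : List Char) (c : Char) (k : Nat) :
    k ∈ pvPos s c ↔ k < s.length ∧ s.getD k ' ' = c := by
  unfold pvPos
  simp only [List.mem_map, List.mem_filter]
  constructor
  · rintro ⟨⟨a, i⟩, ⟨hm, hb⟩, rfl⟩
    obtain ⟨-, hlt, he⟩ := List.mem_zipIdx hm
    have hi : i < s.length := by omega
    refine ⟨hi, ?_⟩
    rw [List.getD_eq_getElem s ' ' hi]
    have : a = s[i] := by simpa using he
    simpa [this] using hb
  · rintro ⟨hk, he⟩
    refine ⟨(c, k), ⟨?_, by simp⟩, rfl⟩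
    rw [List.mk_mem_zipIdx_iff_getElem?, List.getElem?_eq_getElem hk,
      ← List.getD_eq_getElem s ' ' hk, he]

theorem pairwise_pvPos (s : List Char) (c : Char) : (pvPos s c).Pairwise (· < ·) := by
  unfold pvPos
  rw [List.pairwise_map]
  apply List.Pairwise.filter
  rw [List.pairwise_iff_getElem]
  intro a b ha hb hab
  simp only [List.getElem_zipIdx]
  omega

theorem pvPos_mono (s : List Char) (c : Char) {a b : Nat} (hab : a ≤ b)
    (hb : b < (pvPos s c).length) : (pvPos s c).getD a 0 ≤ (pvPos s c).getD b 0 := by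
  rcases Nat.eq_or_lt_of_le hab with h | h
  · subst h; exact le_refl _
  · have := List.pairwise_iff_getElem.mp (pairwise_pvPos s c) a b (by omega) hb h
    rw [List.getD_eq_getElem _ 0 (by omega), List.getD_eq_getElem _ 0 hb]
    omega

theorem pvBisect_stop (ps : List Nat) (j : Nat) {lo hi : Nat} (h : ¬ lo < hi) :
    pvBisect ps j lo hi = lo := by
  conv_lhs => unfold pvBisect
  rw [dif_neg h]

theorem pvBisect_step (ps : List Nat) (j : Nat) {lo hi : Nat} (h : lo < hi) :
    pvBisect ps j lo hi =
      if ps.getD ((lo + hi) / 2) 0 < j then pvBisect ps j ((lo + hi) / 2 + 1) hi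
      else pvBisect ps j lo ((lo + hi) / 2) := by
  conv_lhs => unfold pvBisect
  rw [dif_pos h]

theorem pvBisect_inv (ps : List Nat) (hps : ps.Pairwise (· < ·)) (j : Nat) :
    ∀ n lo hi, hi - lo ≤ n → lo ≤ hi → hi ≤ ps.length →
      (∀ a, a < lo → ps.getD a 0 < j) → (∀ a, hi ≤ a → a < ps.length → j ≤ ps.getD a 0) →
      (pvBisect ps j lo hi ≤ ps.length ∧
       (∀ a, a < pvBisect ps j lo hi → ps.getD a 0 < j) ∧
       (∀ a, pvBisect ps j lo hi ≤ a → a < ps.length → j ≤ ps.getD a 0)) := by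
  have mono : ∀ a b, a ≤ b → b < ps.length → ps.getD a 0 ≤ ps.getD b 0 := by
    intro a b hab hb
    rcases Nat.eq_or_lt_of_le hab with h | h
    · subst h; exact le_refl _
    · have := List.pairwise_iff_getElem.mp hps a b (by omega) hb h
      rw [List.getD_eq_getElem _ 0 (by omega), List.getD_eq_getElem _ 0 hb]
      omega
  intro n
  induction n with
  | zero =>
    intro lo hi h hle hlen hlow hhigh
    rw [pvBisect_stop ps j (by omega)]
    exact ⟨by omega, hlow, fun a ha hla => hhigh a (by omega) hla⟩
  | succ n ih =>
    intro lo hi h hle hlen hlow hhigh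
    by_cases hlt : lo < hi
    · rw [pvBisect_step ps j hlt]
      have hm : lo ≤ (lo + hi) / 2 ∧ (lo + hi) / 2 < hi := by omega
      by_cases hv : ps.getD ((lo + hi) / 2) 0 < j
      · rw [if_pos hv]
        refine ih ((lo + hi) / 2 + 1) hi (by omega) (by omega) hlen ?_ hhigh
        intro a ha
        rcases Nat.lt_or_ge a ((lo + hi) / 2) with h' | h'
        · exact lt_of_le_of_lt (mono a _ (by omega) (by omega)) hv
        · have : a = (lo + hi) / 2 := by omega
          subst this; exact hv
      · rw [if_neg hv]
        refine ih lo ((lo + hi) / 2) (by omega) (by omega) (by omega) hlow ?_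
        intro a ha hla
        exact le_trans (Nat.le_of_not_lt hv) (mono _ a ha hla)
    · rw [pvBisect_stop ps j hlt]
      exact ⟨by omega, hlow, fun a ha hla => hhigh a (by omega) hla⟩

theorem pvBisect_pvNext (s : List Char) (c : Char) (j : Nat) :
    pvBisect (pvPos s c) j 0 (pvPos s c).length ≤ (pvPos s c).length ∧
    (pvBisect (pvPos s c) j 0 (pvPos s c).length = (pvPos s c).length → pvNext s c j = none) ∧
    (pvBisect (pvPos s c) j 0 (pvPos s c).length < (pvPos s c).length →
      pvNext s c j = some ((pvPos s c).getD (pvBisect (pvPos s c) j 0 (pvPos s c).length) 0)) := by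
  obtain ⟨h1, h2, h3⟩ := pvBisect_inv (pvPos s c) (pairwise_pvPos s c) j
    (pvPos s c).length 0 (pvPos s c).length (by omega) (by omega) (le_refl _)
    (fun a ha => absurd ha (Nat.not_lt_zero a))
    (fun a ha hla => absurd (lt_of_le_of_lt ha hla) (lt_irrefl _))
  refine ⟨h1, ?_, ?_⟩
  · intro hr
    cases hk : pvNext s c j with
    | none => rfl
    | some k =>
      obtain ⟨hjk, hks, hkc, -⟩ := pvNext_some s c j k hk
      obtain ⟨a, ha, hae⟩ := List.mem_iff_getElem.mp ((mem_pvPos s c k).mpr ⟨hks, hkc⟩)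
      have := h2 a (by omega)
      rw [List.getD_eq_getElem _ 0 ha, hae] at this
      omega
  · intro hr
    have hv := h3 _ (le_refl _) hr
    have hmem : (pvPos s c).getD (pvBisect (pvPos s c) j 0 (pvPos s c).length) 0 ∈ pvPos s c := by
      rw [List.getD_eq_getElem _ 0 hr]
      exact List.getElem_mem hr
    obtain ⟨hvs, hvc⟩ := (mem_pvPos s c _).mp hmem
    refine pvNext_min s c j _ hv hvs hvc ?_
    intro m hm1 hm2 hmc
    obtain ⟨a, ha, hae⟩ := List.mem_iff_getElem.mp ((mem_pvPos s c m).mpr ⟨by omega, hmc⟩)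
    rcases Nat.lt_or_ge a (pvBisect (pvPos s c) j 0 (pvPos s c).length) with h' | h'
    · have := h2 a h'
      rw [List.getD_eq_getElem _ 0 ha, hae] at this
      omega
    · have := pvPos_mono s c h' ha
      rw [List.getD_eq_getElem _ 0 ha, hae] at this
      omega

theorem pvFold_eq_ref (s : List Char) :
    ∀ (ts : List Char) (j : Nat) (cnt : Int), (∀ c ∈ ts, c ∈ s) →
      (ts.foldl (pvStepB (pvBuildPos s)) (j, cnt)).2 = pvRef s ts j cnt := by
  intro ts
  induction ts with
  | nil => intros; rfl
  | cons c cs ih =>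
    intro j cnt hall
    obtain ⟨h1, h2, h3⟩ := pvBisect_pvNext s c j
    have htail : ∀ x ∈ cs, x ∈ s := fun x hx => hall x (List.mem_cons_of_mem c hx)
    simp only [List.foldl_cons]
    rcases Nat.lt_or_ge (pvBisect (pvPos s c) j 0 (pvPos s c).length) (pvPos s c).length
      with h | h
    · have hn := h3 h
      have hstep : pvStepB (pvBuildPos s) (j, cnt) c =
          ((pvPos s c).getD (pvBisect (pvPos s c) j 0 (pvPos s c).length) 0 + 1, cnt) := by
        unfold pvStepB
        simp only [pvPos_getD]
        rw [if_neg (by omega)]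
      rw [hstep, ih _ _ htail, pvRef_cons_some s cs c j cnt hn]
    · have hr : pvBisect (pvPos s c) j 0 (pvPos s c).length = (pvPos s c).length := by omega
      have hn := h2 hr
      obtain ⟨k0, hk0⟩ := pvNext_zero_isSome s c (hall c List.mem_cons_self)
      obtain ⟨-, hk0s, hk0c, hmin⟩ := pvNext_some s c 0 k0 hk0
      have hk0m : k0 ∈ pvPos s c := (mem_pvPos s c k0).mpr ⟨hk0s, hk0c⟩
      have hlen0 : 0 < (pvPos s c).length := List.length_pos_of_mem hk0m
      have h00 : (pvPos s c).getD 0 0 = k0 := by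
        have hm0 : (pvPos s c).getD 0 0 ∈ pvPos s c := by
          rw [List.getD_eq_getElem _ 0 hlen0]
          exact List.getElem_mem hlen0
        obtain ⟨h0s, h0c⟩ := (mem_pvPos s c _).mp hm0
        obtain ⟨a, ha, hae⟩ := List.mem_iff_getElem.mp hk0m
        have hle : (pvPos s c).getD 0 0 ≤ k0 := by
          have := pvPos_mono s c (Nat.zero_le a) ha
          rw [List.getD_eq_getElem _ 0 ha, hae] at this
          exact this
        have hnl : ¬ ((pvPos s c).getD 0 0 < k0) :=
          fun hlt => hmin _ (Nat.zero_le _) hlt h0c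
        omega
      have hstep : pvStepB (pvBuildPos s) (j, cnt) c = (k0 + 1, cnt + 1) := by
        unfold pvStepB
        simp only [pvPos_getD]
        rw [if_pos hr, h00]
      rw [hstep, ih _ _ htail, pvRef_cons_none s cs c j cnt hn hk0]

theorem pvBuildPos_contains (s : List Char) (c : Char) :
    (pvBuildPos s).contains c = true ↔ c ∈ s := by
  unfold pvBuildPos
  rw [PySem.Dict.contains_eq_decide_mem_keys,
    PySem.Dict.keys_foldl_insert_key s.zipIdx Prod.fst (fun d p => d.getD p.1 [] ++ [p.2]),
    show (PySem.Dict.empty : PySem.Dict Char (List Nat)).keys = [] from rfl,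
    PySem.Set.update_nil_left, List.zipIdx_map_fst 0 s]
  simp [PySem.Set.mem_ofList]

-- ===== VERDICT (by name: the statement is the Claim_ definition above) =====
theorem count_subsequences_spec : Claim_equal_count_subsequences := by
  intro source target _
  unfold Spec_count_subsequences
  simp only [count_subsequences, count_subsequences_alt]
  by_cases hall : ∀ c ∈ target.toList, c ∈ source.toList
  · have hfind : target.toList.find?
        (fun c => !(PySem.Set.contains (PySem.Set.ofList source.toList) c)) = none := by
      rw [List.find?_eq_none]
      intro x hx
      simp only [Bool.not_eq_true', Bool.not_eq_false]
      rw [PySem.Set.contains_iff]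
      exact (PySem.Set.mem_ofList source.toList x).mpr (hall x hx)
    have hany : (target.toList.any (fun c => !((pvBuildPos source.toList).contains c))) = false := by
      rw [List.any_eq_false]
      intro x hx
      simp only [Bool.not_eq_true', Bool.not_eq_false]
      exact (pvBuildPos_contains source.toList x).mpr (hall x hx)
    rw [hfind, hany]
    simp only [Bool.false_eq_true, if_false]
    rw [pvOuterA_eq_ref source.toList target.toList hall target.toList.length 0 0 (by omega),
      pvFold_eq_ref source.toList target.toList source.toList.length 0 hall,
      List.drop_zero]
  · push Not at hall
    obtain ⟨c, hc, hcs⟩ := hall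
    have hfind : (target.toList.find?
        (fun c => !(PySem.Set.contains (PySem.Set.ofList source.toList) c))).isSome := by
      rw [List.find?_isSome]
      refine ⟨c, hc, ?_⟩
      simp only [Bool.not_eq_true']
      rw [← Bool.not_eq_true, PySem.Set.contains_iff]
      simpa [PySem.Set.mem_ofList] using hcs
    have hany : (target.toList.any (fun c => !((pvBuildPos source.toList).contains c))) = true := by
      rw [List.any_eq_true]
      refine ⟨c, hc, ?_⟩
      simp only [Bool.not_eq_true']
      rw [← Bool.not_eq_true]
      simpa [pvBuildPos_contains] using hcs
    obtain ⟨x, hx⟩ := Option.isSome_iff_exists.mp hfind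
    rw [hx, hany]
    simp
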